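-- pv_equiv track=rewrite | github.com/manred1997/search-engine | services/auto-correction/src/utils/metrics.py | get_word_evals
-- ===== SOURCE A (Python) =====
-- from typing import List, Tuple
--
-- def get_word_evals(
--     preds: List[str], sources: List[str], targets: List[str], is_lower=False
-- ) -> Tuple[int, ...]:
--     """
--     This function evaluates the accuarcy of each token in sentence in batch
--     :param preds List[str], sources List[str], targets List[str]
--     :return
--         no. of correction to correction tokens
--
--         no. of correction to incorrection tokens
--
--         no. of incorrection to correction tokens
--
--         no. of incorrection to incorrection tokens
--
--     """
--
--     correct2correct = 0
--     correct2incorrect = 0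
--     incorrect2correct = 0
--     incorrect2incorrect = 0
--
--     is_same_words = None
--     if is_lower:
--         is_same_words = lambda word_1, word_2: word_1.lower() == word_2.lower()
--     else:
--         is_same_words = lambda word_1, word_2: word_1 == word_2
--
--     assert len(preds) == len(targets) == len(sources)
--
--     for pred, source, target in zip(preds, sources, targets):
--
--         pred = pred.split()
--         source = source.split()
--         target = target.split()
--
--         assert len(pred) == len(source) == len(target)
--
--         for p, s, t in zip(pred, source, target):
--             if is_same_words(s, t) and is_same_words(p, t):
--                 correct2correct += 1
--             elif is_same_words(s, t) and not is_same_words(p, t):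
--                 correct2incorrect += 1
--             elif not is_same_words(s, t) and is_same_words(p, t):
--                 incorrect2correct += 1
--             elif not is_same_words(s, t) and not is_same_words(p, t):
--                 incorrect2incorrect += 1
--
--     return (correct2correct, correct2incorrect, incorrect2correct, incorrect2incorrect)
-- ===== SOURCE B (Python) =====
-- from typing import List, Tuple
--
-- def get_word_evals(
--     preds: List[str], sources: List[str], targets: List[str], is_lower=False
-- ) -> Tuple[int, ...]:
--     if is_lower:
--         is_same_words = lambda word_1, word_2: word_1.lower() == word_2.lower()
--     else:
--         is_same_words = lambda word_1, word_2: word_1 == word_2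
--
--     assert len(preds) == len(targets) == len(sources)
--
--     # stage 1: flatten the batch into one list of (p, s, t) token triples
--     triples = []
--     for pred, source, target in zip(preds, sources, targets):
--         p, s, t = pred.split(), source.split(), target.split()
--         assert len(p) == len(s) == len(t)
--         triples.extend(zip(p, s, t))
--
--     # stage 2: three marginal counts, then inclusion-exclusion for the four cells
--     n = len(triples)
--     st = sum(1 for p, s, t in triples if is_same_words(s, t))
--     pt = sum(1 for p, s, t in triples if is_same_words(p, t))
--     both = sum(1 for p, s, t in triples if is_same_words(s, t) and is_same_words(p, t))
--     return (both, st - both, pt - both, n - st - pt + both)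
-- ===== Notes on version B (the rewrite author's own statement) =====
-- stated objective: alternative
-- what changed: Instead of a four-way branch updating four counters inside the nested loop, B first flattens the batch into one list of token triples, then computes three marginal counts (s==t, p==t, both) plus the total and derives the four cells by inclusion-exclusion; Pre_ excludes inputs on which A's asserts raise AssertionError (mismatched list lengths or per-sentence token counts).
import Mathlib
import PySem

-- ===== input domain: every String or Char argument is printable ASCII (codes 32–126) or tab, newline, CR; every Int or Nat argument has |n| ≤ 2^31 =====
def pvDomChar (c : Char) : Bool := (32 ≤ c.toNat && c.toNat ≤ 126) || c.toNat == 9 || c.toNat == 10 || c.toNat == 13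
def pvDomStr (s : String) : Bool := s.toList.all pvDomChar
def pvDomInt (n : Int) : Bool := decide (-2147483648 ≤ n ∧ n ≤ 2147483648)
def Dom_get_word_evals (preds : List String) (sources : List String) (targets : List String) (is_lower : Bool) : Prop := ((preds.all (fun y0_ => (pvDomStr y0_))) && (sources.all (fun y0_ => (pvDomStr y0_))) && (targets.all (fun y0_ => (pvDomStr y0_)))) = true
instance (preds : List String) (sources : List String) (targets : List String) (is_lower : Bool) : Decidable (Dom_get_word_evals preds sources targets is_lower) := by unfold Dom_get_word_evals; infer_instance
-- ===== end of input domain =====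

-- B replaces A's four-way branch over four counters by two stages: flatten the batch
-- into one token-triple list, take three marginal counts, and derive the four cells
-- by inclusion-exclusion; same cost, different decomposition.

-- shared helper: the selected is_same_words lambda
def pvSame (is_lower : Bool) (w1 w2 : String) : Bool :=
  if is_lower then PySem.Str.lower w1 == PySem.Str.lower w2 else w1 == w2

-- ===== PORT A =====
def get_word_evals (preds : List String) (sources : List String) (targets : List String) (is_lower : Bool) : Int × Int × Int × Int :=
  (preds.zip (sources.zip targets)).foldl (fun acc x =>
    let pred := PySem.Str.split₀ x.1
    let source := PySem.Str.split₀ x.2.1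
    let target := PySem.Str.split₀ x.2.2
    (pred.zip (source.zip target)).foldl (fun acc2 y =>
      let p := y.1; let s := y.2.1; let t := y.2.2
      if pvSame is_lower s t && pvSame is_lower p t then
        (acc2.1 + 1, acc2.2.1, acc2.2.2.1, acc2.2.2.2)
      else if pvSame is_lower s t && !(pvSame is_lower p t) then
        (acc2.1, acc2.2.1 + 1, acc2.2.2.1, acc2.2.2.2)
      else if !(pvSame is_lower s t) && pvSame is_lower p t then
        (acc2.1, acc2.2.1, acc2.2.2.1 + 1, acc2.2.2.2)
      else if !(pvSame is_lower s t) && !(pvSame is_lower p t) then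
        (acc2.1, acc2.2.1, acc2.2.2.1, acc2.2.2.2 + 1)
      else acc2) acc) (0, 0, 0, 0)

-- ===== PORT B =====
-- stage 1: triples.extend(zip(p, s, t)) per sentence; stage 2: marginal counts
-- (sum of a 0/1 generator = List.countP) and inclusion-exclusion.
def get_word_evals_alt (preds : List String) (sources : List String) (targets : List String) (is_lower : Bool) : Int × Int × Int × Int :=
  let triples := (preds.zip (sources.zip targets)).foldl (fun acc x =>
    acc ++ ((PySem.Str.split₀ x.1).zip ((PySem.Str.split₀ x.2.1).zip (PySem.Str.split₀ x.2.2)))) []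
  let n : Int := triples.length
  let st : Int := (triples.countP (fun y => pvSame is_lower y.2.1 y.2.2) : Int)
  let pt : Int := (triples.countP (fun y => pvSame is_lower y.1 y.2.2) : Int)
  let both : Int := (triples.countP (fun y => pvSame is_lower y.2.1 y.2.2 && pvSame is_lower y.1 y.2.2) : Int)
  (both, st - both, pt - both, n - st - pt + both)

-- ===== PRECONDITION & SPEC =====
-- Pre_ excludes exactly the inputs on which A's asserts raise AssertionError:
-- mismatched list lengths, or a sentence triple whose whitespace-split token counts differ.
def Pre_get_word_evals (preds : List String) (sources : List String) (targets : List String) (is_lower : Bool) : Prop :=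
  preds.length = targets.length ∧ targets.length = sources.length ∧
  ∀ x ∈ preds.zip (sources.zip targets),
    (PySem.Str.split₀ x.1).length = (PySem.Str.split₀ x.2.1).length ∧
    (PySem.Str.split₀ x.2.1).length = (PySem.Str.split₀ x.2.2).length

instance (preds : List String) (sources : List String) (targets : List String) (is_lower : Bool) : Decidable (Pre_get_word_evals preds sources targets is_lower) := by unfold Pre_get_word_evals; infer_instance

def pvWitness_get_word_evals : List String × List String × List String × Bool :=
  (["a b", "c"], ["a x", "c"], ["a b", "d"], false)

def Spec_get_word_evals (preds : List String) (sources : List String) (targets : List String) (is_lower : Bool) (out : Int × Int × Int × Int) : Prop := out = get_word_evals_alt preds sources targets is_lower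
instance (preds : List String) (sources : List String) (targets : List String) (is_lower : Bool) (out : Int × Int × Int × Int) : Decidable (Spec_get_word_evals preds sources targets is_lower out) := by unfold Spec_get_word_evals; infer_instance

-- ===== CLAIM (what is proved, stated in full; the proofs are below) =====
def Claim_equal_get_word_evals : Prop := ∀ (preds : List String) (sources : List String) (targets : List String) (is_lower : Bool), Dom_get_word_evals preds sources targets is_lower → Pre_get_word_evals preds sources targets is_lower → Spec_get_word_evals preds sources targets is_lower (get_word_evals preds sources targets is_lower)

-- ===== LEMMAS AND PROOFS =====

-- the per-token boolean pair both programs classify by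
def pvKey (is_lower : Bool) (y : String × String × String) : Bool × Bool :=
  (pvSame is_lower y.2.1 y.2.2, pvSame is_lower y.1 y.2.2)

-- A's inner loop adds, to each counter, the number of tokens with the matching key
theorem pvInnerA (is_lower : Bool) (l : List (String × String × String)) (a b c e : Int) :
    l.foldl (fun acc2 y =>
      let p := y.1; let s := y.2.1; let t := y.2.2
      if pvSame is_lower s t && pvSame is_lower p t then
        (acc2.1 + 1, acc2.2.1, acc2.2.2.1, acc2.2.2.2)
      else if pvSame is_lower s t && !(pvSame is_lower p t) then
        (acc2.1, acc2.2.1 + 1, acc2.2.2.1, acc2.2.2.2)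
      else if !(pvSame is_lower s t) && pvSame is_lower p t then
        (acc2.1, acc2.2.1, acc2.2.2.1 + 1, acc2.2.2.2)
      else if !(pvSame is_lower s t) && !(pvSame is_lower p t) then
        (acc2.1, acc2.2.1, acc2.2.2.1, acc2.2.2.2 + 1)
      else acc2) (a, b, c, e)
    = (a + ((l.map (pvKey is_lower)).count (true, true) : Int),
       b + ((l.map (pvKey is_lower)).count (true, false) : Int),
       c + ((l.map (pvKey is_lower)).count (false, true) : Int),
       e + ((l.map (pvKey is_lower)).count (false, false) : Int)) := by
  induction l generalizing a b c e with
  | nil => simp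
  | cons y l ih =>
    rcases hs : pvSame is_lower y.2.1 y.2.2 <;> rcases hp : pvSame is_lower y.1 y.2.2 <;>
    · simp only [List.foldl_cons, List.map_cons, hs, hp, Bool.and_self, Bool.and_true,
        Bool.and_false, Bool.not_true, Bool.not_false]
      rw [ih]
      simp [pvKey, hs, hp, Prod.mk.injEq]
      omega

-- A's nested loop is the inner step folded over the flattened triple list
theorem pvFlattenA {α β : Type} (g : α → List β) (f : Int × Int × Int × Int → β → Int × Int × Int × Int)
    (L : List α) (acc : Int × Int × Int × Int) :
    L.foldl (fun acc x => (g x).foldl f acc) acc = (L.flatMap g).foldl f acc := by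
  induction L generalizing acc with
  | nil => rfl
  | cons x L ih => simp [List.foldl_append, ih]

-- marginal counts and total versus the four key counts
theorem pvCounts (il : Bool) (l : List (String × String × String)) :
    l.countP (fun y => pvSame il y.2.1 y.2.2)
      = (l.map (pvKey il)).count (true, true) + (l.map (pvKey il)).count (true, false)
  ∧ l.countP (fun y => pvSame il y.1 y.2.2)
      = (l.map (pvKey il)).count (true, true) + (l.map (pvKey il)).count (false, true)
  ∧ l.countP (fun y => pvSame il y.2.1 y.2.2 && pvSame il y.1 y.2.2)
      = (l.map (pvKey il)).count (true, true)
  ∧ l.length = (l.map (pvKey il)).count (true, true) + (l.map (pvKey il)).count (true, false)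
      + (l.map (pvKey il)).count (false, true) + (l.map (pvKey il)).count (false, false) := by
  induction l with
  | nil => simp
  | cons y l ih =>
    obtain ⟨h1, h2, h3, h4⟩ := ih
    rcases hs : pvSame il y.2.1 y.2.2 <;> rcases hp : pvSame il y.1 y.2.2 <;>
    · simp [List.countP_cons, List.count_cons, pvKey, hs, hp, h1, h2, h3, h4]
      omega

-- ===== VERDICT (by name: the statement is the Claim_ definition above) =====
theorem get_word_evals_spec : Claim_equal_get_word_evals := by
  intro preds sources targets is_lower _ _
  unfold Spec_get_word_evals get_word_evals get_word_evals_alt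
  rw [pvFlattenA, PySem.List.foldl_append_eq_flatMap]
  set flat := (preds.zip (sources.zip targets)).flatMap (fun x =>
    ((PySem.Str.split₀ x.1).zip ((PySem.Str.split₀ x.2.1).zip (PySem.Str.split₀ x.2.2)))) with hflat
  rw [List.nil_append]
  rw [pvInnerA]
  obtain ⟨h1, h2, h3, h4⟩ := pvCounts is_lower flat
  simp only [Prod.mk.injEq, h1, h2, h3, h4]
  push_cast
  refine ⟨by ring, by ring, by ring, by ring⟩
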